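-- pv_equiv track=rewrite | github.com/DmitryKochetkov/polyakov_py | solutions24/problem174_old.py | max_closed_substring_length
-- ===== SOURCE A (Python) =====
-- def max_closed_substring_length(line):
--     result = 0
--     nearest_position = dict()
--
--     for i in range(len(line)):
--         if line[i] in nearest_position.keys():
--             result = max(result, i-nearest_position[line[i]])
--
--         nearest_position[line[i]] = i
--
--     return result
-- ===== SOURCE B (Python) =====
-- def max_closed_substring_length(line):
--     positions = {}
--     for i, ch in enumerate(line):
--         positions.setdefault(ch, []).append(i)
--     best = 0
--     for ps in positions.values():
--         for a, b in zip(ps, ps[1:]):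
--             best = max(best, b - a)
--     return best
-- ===== Notes on version B (the rewrite author's own statement) =====
-- stated objective: alternative
-- what changed: B replaces A's single pass that tracks each character's most recent index and updates a running max with a group-then-scan design: it first builds a dict mapping each character to the ascending list of all its indices, then takes the max of adjacent differences within each group.
import Mathlib
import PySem

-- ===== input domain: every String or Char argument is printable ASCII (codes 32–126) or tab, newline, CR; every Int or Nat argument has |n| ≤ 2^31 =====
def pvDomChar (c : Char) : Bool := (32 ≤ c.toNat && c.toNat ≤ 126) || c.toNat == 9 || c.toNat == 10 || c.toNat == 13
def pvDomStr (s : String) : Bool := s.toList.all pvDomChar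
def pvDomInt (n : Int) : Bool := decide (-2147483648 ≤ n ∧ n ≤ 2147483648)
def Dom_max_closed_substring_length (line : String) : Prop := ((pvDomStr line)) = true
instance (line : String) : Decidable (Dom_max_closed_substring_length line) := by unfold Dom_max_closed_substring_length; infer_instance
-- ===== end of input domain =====

-- B groups all indices per character first and then scans adjacent differences per group,
-- instead of A's running "nearest previous occurrence" update; same cost, different structure.

-- ===== PORT A =====
-- for i in range(len(line)): if line[i] in nearest_position: result = max(result, i - nearest_position[line[i]]); nearest_position[line[i]] = i
def max_closed_substring_length (line : String) : Int :=
  ((PySem.List.enumerate line.toList).foldl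
    (fun (st : Int × PySem.Dict Char Int) p =>
      ((match st.2.get? p.2 with
        | some prev => max st.1 (p.1 - prev)
        | none => st.1), st.2.insert p.2 p.1))
    (0, PySem.Dict.empty)).1

-- ===== PORT B =====
-- positions.setdefault(ch, []).append(i)  (list at ch becomes old ++ [i]; new key appended at end);
-- then best = max over groups of adjacent differences
def max_closed_substring_length_alt (line : String) : Int :=
  let positions : PySem.Dict Char (List Int) :=
    (PySem.List.enumerate line.toList).foldl
      (fun d p => d.insert p.2 (d.getD p.2 [] ++ [p.1])) PySem.Dict.empty
  positions.values.foldl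
    (fun best ps => (ps.zip ps.tail).foldl (fun best ab => max best (ab.2 - ab.1)) best) 0

-- ===== PRECONDITION & SPEC =====
def Spec_max_closed_substring_length (line : String) (out : Int) : Prop := out = max_closed_substring_length_alt line
instance (line : String) (out : Int) : Decidable (Spec_max_closed_substring_length line out) := by unfold Spec_max_closed_substring_length; infer_instance

-- ===== CLAIM (what is proved, stated in full; the proofs are below) =====
def Claim_equal_max_closed_substring_length : Prop := ∀ (line : String), Dom_max_closed_substring_length line → Spec_max_closed_substring_length line (max_closed_substring_length line)

-- ===== LEMMAS AND PROOFS =====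

-- the adjacent differences of a position list (the values B's inner loop maxes over)
def pvGaps (ps : List Int) : List Int := (ps.zip ps.tail).map (fun ab => ab.2 - ab.1)

lemma pv_foldl_max_max (l : List Int) (a g : Int) :
    l.foldl max (max a g) = max (l.foldl max a) g := by
  induction l generalizing a with
  | nil => rfl
  | cons x t ih =>
    simp only [List.foldl_cons]
    rw [max_right_comm a g x, ih]

lemma pv_gaps_concat (ps : List Int) (h : ps ≠ []) (x : Int) :
    pvGaps (ps ++ [x]) = pvGaps ps ++ [x - ps.getLastD 0] := by
  induction ps with
  | nil => simp at h
  | cons y t ih =>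
    cases t with
    | nil => simp [pvGaps]
    | cons z t' =>
      simp only [pvGaps, List.cons_append, List.tail_cons, List.zip_cons_cons,
        List.map_cons, List.getLastD_cons] at *
      rw [ih (by simp)]

lemma pv_getD_of_get? (d : PySem.Dict Char (List Int)) (c : Char) (ps : List Int)
    (h : d.get? c = some ps) : d.getD c [] = ps := by
  unfold PySem.Dict.getD; rw [h]; rfl

-- loop invariant: A's running max equals the max over all adjacent gaps in B's groups dict
lemma pv_inv (cs : List Char) (s : Int) (res : Int) (np : PySem.Dict Char Int)
    (d : PySem.Dict Char (List Int))
    (hnd : d.keys.Nodup)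
    (h1 : ∀ c, np.get? c = (d.get? c).map (fun ps => ps.getLastD 0))
    (h2 : ∀ ps ∈ d.values, ps ≠ [])
    (h3 : res = (d.items.flatMap (fun p => pvGaps p.2)).foldl max 0) :
    ((PySem.List.enumerate cs s).foldl
      (fun (st : Int × PySem.Dict Char Int) p =>
        ((match st.2.get? p.2 with
          | some prev => max st.1 (p.1 - prev)
          | none => st.1), st.2.insert p.2 p.1)) (res, np)).1
    = ((((PySem.List.enumerate cs s).foldl
        (fun d p => d.insert p.2 (d.getD p.2 [] ++ [p.1])) d).items.flatMap
            (fun p => pvGaps p.2)).foldl max 0) := by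
  induction cs generalizing s res np d with
  | nil => simpa [PySem.List.enumerate_nil] using h3
  | cons c cs ih =>
    rw [PySem.List.enumerate_cons]
    simp only [List.foldl_cons]
    cases hg : d.get? c with
    | none =>
      have hc : d.contains c = false := by
        rw [PySem.Dict.contains_eq_isSome_get?, hg]; rfl
      have hcm : c ∉ d.keys := by
        rw [← PySem.Dict.get?_eq_none_iff_not_mem_keys]; exact hg
      have hgd : d.getD c [] = [] := by unfold PySem.Dict.getD; rw [hg]; rfl
      have hit : (d.insert c (d.getD c [] ++ [s])).items = d.items ++ [(c, [s])] := by
        rw [hgd]; simpa using PySem.Dict.items_insert_of_not_contains d [s] hc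
      rw [h1 c, hg]
      apply ih
      · -- keys nodup
        have : (d.insert c (d.getD c [] ++ [s])).keys = d.keys ++ [c] := by
          simp [PySem.Dict.keys, hit]
        rw [this, List.nodup_append]
        refine ⟨hnd, List.nodup_singleton c, ?_⟩
        intro a ha b hb
        have hb' : b = c := List.mem_singleton.1 hb
        subst hb'
        exact fun h => hcm (h ▸ ha)
      · -- h1
        intro c'
        by_cases hcc : c' = c
        · subst hcc
          rw [PySem.Dict.get?_insert_self, hgd, PySem.Dict.get?_insert_self]
          rfl
        · rw [PySem.Dict.get?_insert_of_ne _ _ hcc, PySem.Dict.get?_insert_of_ne _ _ hcc,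
            h1 c']
      · -- h2
        intro ps hps
        have : (d.insert c (d.getD c [] ++ [s])).values = d.values ++ [[s]] := by
          simp [PySem.Dict.values, hit]
        rw [this] at hps
        rcases List.mem_append.1 hps with h | h
        · exact h2 ps h
        · simp at h; subst h; simp
      · -- h3
        rw [hit]
        simp [pvGaps, h3]
    | some ps =>
      have hpsv : ps ∈ d.values := by
        have := PySem.Dict.mem_items_of_get?_eq_some d hg
        exact List.mem_map.2 ⟨(c, ps), this, rfl⟩
      have hne : ps ≠ [] := h2 ps hpsv
      have hgd : d.getD c [] = ps := pv_getD_of_get? d c ps hg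
      have hc : d.contains c = true := by
        rw [PySem.Dict.contains_eq_isSome_get?, hg]; rfl
      -- decompose items around the unique entry for c
      obtain ⟨l1, l2, hdec⟩ := List.append_of_mem (PySem.Dict.mem_items_of_get?_eq_some d hg)
      have hkeys : d.keys = l1.map Prod.fst ++ c :: l2.map Prod.fst := by
        simp [PySem.Dict.keys, hdec]
      have hcl1 : c ∉ l1.map Prod.fst ∧ c ∉ l2.map Prod.fst := by
        rw [hkeys] at hnd
        obtain ⟨-, h2', h3'⟩ := List.nodup_append.1 hnd
        exact ⟨fun hm => (h3' c hm c (List.mem_cons_self ..)) rfl, (List.nodup_cons.1 h2').1⟩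
      have hit : (d.insert c (d.getD c [] ++ [s])).items
          = l1 ++ (c, ps ++ [s]) :: l2 := by
        rw [hgd, PySem.Dict.items_insert_of_contains d (ps ++ [s]) hc, hdec,
          List.map_append, List.map_cons]
        have m1 : l1.map (fun p => if (p.1 == c) = true then (c, ps ++ [s]) else p) = l1 := by
          conv_rhs => rw [← List.map_id l1]
          apply List.map_congr_left
          intro p hp
          have hpc : p.1 ≠ c := fun h => hcl1.1 (List.mem_map.2 ⟨p, hp, h⟩)
          simp [hpc]
        have m2 : l2.map (fun p => if (p.1 == c) = true then (c, ps ++ [s]) else p) = l2 := by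
          conv_rhs => rw [← List.map_id l2]
          apply List.map_congr_left
          intro p hp
          have hpc : p.1 ≠ c := fun h => hcl1.2 (List.mem_map.2 ⟨p, hp, h⟩)
          simp [hpc]
        rw [m1, m2]
        simp
      rw [h1 c, hg]
      apply ih
      · -- keys nodup: same key multiset as before
        have : (d.insert c (d.getD c [] ++ [s])).keys = d.keys := by
          simp [PySem.Dict.keys, hit, hdec]
        rw [this]; exact hnd
      · -- h1
        intro c'
        by_cases hcc : c' = c
        · subst hcc
          rw [PySem.Dict.get?_insert_self, hgd, PySem.Dict.get?_insert_self]
          simp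
        · rw [PySem.Dict.get?_insert_of_ne _ _ hcc, PySem.Dict.get?_insert_of_ne _ _ hcc,
            h1 c']
      · -- h2
        intro qs hqs
        have : (d.insert c (d.getD c [] ++ [s])).values
            = l1.map Prod.snd ++ (ps ++ [s]) :: l2.map Prod.snd := by
          simp [PySem.Dict.values, hit]
        have hvals : d.values = l1.map Prod.snd ++ ps :: l2.map Prod.snd := by
          simp [PySem.Dict.values, hdec]
        rw [this] at hqs
        rcases List.mem_append.1 hqs with h | h
        · exact h2 qs (by rw [hvals]; exact List.mem_append_left _ h)
        · rcases List.mem_cons.1 h with h | h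
          · subst h; simp
          · exact h2 qs (by rw [hvals]; exact List.mem_append_right _ (List.mem_cons_of_mem _ h))
      · -- h3
        rw [hit, List.flatMap_append, List.flatMap_cons]
        rw [hdec, List.flatMap_append, List.flatMap_cons] at h3
        rw [pv_gaps_concat ps hne s]
        set G1 := l1.flatMap (fun p => pvGaps p.2)
        set G2 := l2.flatMap (fun p => pvGaps p.2)
        rw [List.foldl_append, List.foldl_append, List.foldl_append, List.foldl_cons,
          List.foldl_nil, pv_foldl_max_max]
        rw [h3, List.foldl_append, List.foldl_append]
        rfl

-- ===== VERDICT (by name: the statement is the Claim_ definition above) =====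
theorem max_closed_substring_length_spec : Claim_equal_max_closed_substring_length := by
  intro line _
  unfold Spec_max_closed_substring_length max_closed_substring_length max_closed_substring_length_alt
  rw [pv_inv line.toList 0 0 PySem.Dict.empty PySem.Dict.empty
    (by decide) (by intro c; simp [pysem])
    (by intro ps hps
        rw [show (PySem.Dict.empty : PySem.Dict Char (List Int)).values = [] from rfl] at hps
        cases hps)
    (by decide)]
  simp only [PySem.Dict.values]
  have inner : ∀ (b : Int) (qs : List Int),
      (pvGaps qs).foldl max b
        = (qs.zip qs.tail).foldl (fun best ab => max best (ab.2 - ab.1)) b := by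
    intro b qs; simp [pvGaps, List.foldl_map]
  rw [List.foldl_flatMap, List.foldl_map]
  simp only [inner]
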